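-- pv_equiv track=rewrite | github.com/sudheerj/datastructures-algorithms | src/python/algorithms/array/50.redistributionIntoBoxes/redistribution_into_boxes.py | min_boxes
-- ===== SOURCE A (Python) =====
-- def min_boxes(apples, capacity):
--     total = sum(apples)
--     capacity.sort(reverse=True)
--
--     min_boxes = 0
--     for cap in capacity:
--         total -= cap
--         min_boxes += 1
--         if total <= 0:
--             break
--
--     return min_boxes
-- ===== SOURCE B (Python) =====
-- def min_boxes(apples, capacity):
--     # Complement view: instead of taking largest boxes until the apples are
--     # covered, drop as many of the smallest boxes as possible while the
--     # remaining capacity still covers the apples (always keeping one box).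
--     capacity.sort(reverse=True)
--     n = len(capacity)
--     if n == 0:
--         return 0
--     slack = sum(capacity) - sum(apples)
--     dropped = 0
--     s = 0
--     j = 0
--     for c in reversed(capacity[1:]):  # smallest boxes first
--         s += c
--         j += 1
--         if s <= slack:
--             dropped = j
--     return n - dropped
-- ===== Notes on version B (the rewrite author's own statement) =====
-- stated objective: alternative
-- what changed: B takes the complement view: instead of greedily taking the largest boxes until the apples are covered, it computes the total slack and finds how many of the smallest boxes can be dropped while the remaining capacity still suffices, returning n minus that count.
import Mathlib
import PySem

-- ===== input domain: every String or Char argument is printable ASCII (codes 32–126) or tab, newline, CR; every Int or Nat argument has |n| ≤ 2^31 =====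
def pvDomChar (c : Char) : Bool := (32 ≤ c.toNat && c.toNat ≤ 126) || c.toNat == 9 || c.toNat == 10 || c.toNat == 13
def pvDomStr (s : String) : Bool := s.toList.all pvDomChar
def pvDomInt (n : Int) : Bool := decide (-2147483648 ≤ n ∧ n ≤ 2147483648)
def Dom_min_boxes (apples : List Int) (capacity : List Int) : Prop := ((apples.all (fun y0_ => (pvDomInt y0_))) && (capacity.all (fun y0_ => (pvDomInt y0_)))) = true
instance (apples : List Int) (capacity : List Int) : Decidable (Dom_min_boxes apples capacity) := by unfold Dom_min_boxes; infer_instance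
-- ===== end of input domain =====

-- B takes the complement view: drop as many of the smallest boxes as the slack allows, return n - dropped (alternative algorithm, same cost).
-- Both A and B sort `capacity` in place descending (same mutation); the equivalence proved is about the return value.

-- ===== PORT A =====
-- A's greedy loop: subtract capacities largest-first, count boxes, break when covered
def minBoxesLoopA : List Int → Int → Int → Int
  | [], _, mb => mb
  | c :: rest, total, mb =>
    let total' := total - c
    let mb' := mb + 1
    if total' ≤ 0 then mb' else minBoxesLoopA rest total' mb'

def min_boxes (apples : List Int) (capacity : List Int) : Int :=
  let total := apples.sum
  let cap := PySem.List.sorted capacity (fun x => x) true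
  minBoxesLoopA cap total 0

-- ===== PORT B =====
-- B's loop: scan the smallest n-1 boxes (ascending), record the largest count whose
-- cumulative size fits in the slack
def dropLoopB : List Int → Int → Int → Int → Int → Int
  | [], _, _, dropped, _ => dropped
  | c :: rest, s, j, dropped, slack =>
    let s' := s + c
    let j' := j + 1
    dropLoopB rest s' j' (if s' ≤ slack then j' else dropped) slack

def min_boxes_alt (apples : List Int) (capacity : List Int) : Int :=
  let cap := PySem.List.sorted capacity (fun x => x) true
  let n : Int := (cap.length : Int)
  if n == 0 then 0
  else
    let slack := cap.sum - apples.sum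
    -- capacity[1:] is exactly `cap.drop 1`; reversed(...) is `.reverse`
    let dropped := dropLoopB (cap.drop 1).reverse 0 0 0 slack
    n - dropped

-- ===== PRECONDITION & SPEC =====
def Spec_min_boxes (apples : List Int) (capacity : List Int) (out : Int) : Prop := out = min_boxes_alt apples capacity
instance (apples : List Int) (capacity : List Int) (out : Int) : Decidable (Spec_min_boxes apples capacity out) := by unfold Spec_min_boxes; infer_instance

-- ===== CLAIM (what is proved, stated in full; the proofs are below) =====
def Claim_equal_min_boxes : Prop := ∀ (apples : List Int) (capacity : List Int), Dom_min_boxes apples capacity → Spec_min_boxes apples capacity (min_boxes apples capacity)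

-- ===== LEMMAS AND PROOFS =====

-- 1-based index of the first prefix of `cap` whose sum reaches `t` (length of cap if none)
def firstHit : List Int → Int → Int
  | [], _ => 0
  | c :: r, t => if t - c ≤ 0 then 1 else 1 + firstHit r (t - c)

-- largest m such that the sum of the first m elements is ≤ b (0 if none)
def maxFit : List Int → Int → Int
  | [], _ => 0
  | c :: r, b =>
    let m := maxFit r (b - c)
    if 0 < m then 1 + m else if c ≤ b then 1 else 0

lemma maxFit_nonneg (zs : List Int) (b : Int) : 0 ≤ maxFit zs b := by
  induction zs generalizing b with
  | nil => simp [maxFit]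
  | cons c r ih =>
    simp only [maxFit]
    have := ih (b - c)
    split_ifs <;> omega

lemma loopA_eq (cap : List Int) (t i : Int) :
    minBoxesLoopA cap t i = i + firstHit cap t := by
  induction cap generalizing t i with
  | nil => simp [minBoxesLoopA, firstHit]
  | cons c r ih =>
    simp only [minBoxesLoopA, firstHit]
    by_cases h : t - c ≤ 0
    · simp [h]
    · simp only [if_neg h, ih]
      ring

lemma dropLoopB_eq (zs : List Int) (s j d slack : Int) :
    dropLoopB zs s j d slack =
      if 0 < maxFit zs (slack - s) then j + maxFit zs (slack - s) else d := by
  induction zs generalizing s j d with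
  | nil => simp [dropLoopB, maxFit]
  | cons c r ih =>
    simp only [dropLoopB, maxFit]
    rw [ih]
    have h1 : slack - (s + c) = slack - s - c := by ring
    rw [h1]
    have := maxFit_nonneg r (slack - s - c)
    split_ifs <;> omega

lemma firstHit_append (c : Int) (xs : List Int) (t : Int) :
    firstHit (xs ++ [c]) t =
      if (firstHit xs t < (xs.length : Int) ∨ t ≤ xs.sum) ∧ xs ≠ [] then firstHit xs t
      else (xs.length : Int) + 1 := by
  induction xs generalizing t with
  | nil => simp [firstHit]
  | cons x xs' ih =>
    by_cases hx : xs' = []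
    · subst hx
      simp only [List.cons_append, List.nil_append, firstHit, List.length_cons,
        List.length_nil, List.sum_cons, List.sum_nil, List.cons_ne_nil, ne_eq,
        not_false_eq_true, and_true]
      split_ifs <;> push_cast <;> omega
    · simp only [List.cons_append, firstHit, ih, List.length_cons, List.sum_cons,
        List.cons_ne_nil, ne_eq, not_false_eq_true, and_true, hx]
      have hlp : 0 < xs'.length := List.length_pos_iff.mpr hx
      split_ifs <;> push_cast <;> omega

lemma firstHit_eq_maxFit (c0 t : Int) (zs : List Int) :
    firstHit (c0 :: zs.reverse) t = (1 + (zs.length : Int)) - maxFit zs (c0 + zs.sum - t) := by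
  induction zs with
  | nil => simp [firstHit, maxFit]
  | cons c zs' ih =>
    have hrw : c0 :: (c :: zs').reverse = (c0 :: zs'.reverse) ++ [c] := by simp
    rw [hrw, firstHit_append, ih]
    have hnn := maxFit_nonneg zs' (c0 + zs'.sum - t)
    simp only [maxFit, List.length_cons, List.sum_cons, List.length_reverse,
      List.sum_reverse, List.cons_ne_nil, ne_eq, not_false_eq_true, and_true]
    have hb : c0 + (c + zs'.sum) - t - c = c0 + zs'.sum - t := by ring
    rw [hb]
    split_ifs <;> push_cast <;> omega

-- ===== VERDICT (by name: the statement is the Claim_ definition above) =====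
theorem min_boxes_spec : Claim_equal_min_boxes := by
  intro apples capacity _
  unfold Spec_min_boxes
  show min_boxes apples capacity = min_boxes_alt apples capacity
  simp only [min_boxes, min_boxes_alt]
  cases hc : PySem.List.sorted capacity (fun x => x) true with
  | nil => simp [minBoxesLoopA]
  | cons c0 rest =>
    rw [if_neg (by simp only [List.length_cons, beq_iff_eq]; push_cast; omega)]
    rw [loopA_eq, dropLoopB_eq]
    simp only [List.drop_succ_cons, List.drop_zero, List.sum_cons, List.length_cons]
    have hslack : c0 + rest.sum - apples.sum - 0 = c0 + rest.sum - apples.sum := by ring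
    rw [hslack]
    have key := firstHit_eq_maxFit c0 apples.sum rest.reverse
    rw [List.reverse_reverse, List.length_reverse, List.sum_reverse] at key
    have hnn := maxFit_nonneg rest.reverse (c0 + rest.sum - apples.sum)
    split_ifs <;> push_cast at key ⊢ <;> omega
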